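-- pv_equiv track=rewrite | github.com/bigbubs0/gqr-workspace | autoresearch/evals/assertions.py | assert_onsite_disclosure
-- ===== SOURCE A (Python) =====
-- from typing import Dict, List, Tuple
--
-- def _get_inmail_section(output: str) -> str:
--     """
--     Return the portion of output starting from the first InMail.
--     """
--     upper = output.upper()
--     inmail_pos = upper.find('INMAIL')
--     if inmail_pos == -1:
--         # Try to find Subject: as fallback
--         subj_pos = output.lower().find('subject:')
--         if subj_pos != -1:
--             return output[subj_pos:]
--         return ''
--     return output[inmail_pos:]
--
-- def assert_onsite_disclosure(output: str, metadata: Dict) -> bool: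
--     """
--     If the role requires 3+ days onsite per week, the InMail must mention
--     location/onsite requirement.
--     """
--     onsite_days = metadata.get('onsite_days', 0)
--
--     # Auto-pass for fully remote or light hybrid roles
--     if onsite_days < 3:
--         return True
--
--     inmail_section = _get_inmail_section(output)
--     if not inmail_section:
--         return False
--
--     location_terms = [
--         'onsite', 'on-site', 'on site',
--         'hybrid', 'days per week', 'days/week', 'd/w',
--         'days on-site', 'days on site', 'in-office', 'in office',
--         'based in', 'office-based', 'reporting to the',
--         # Specific city patterns (onsite roles have cities in the JDs)
--         'san francisco', 'south san francisco', 'newton', 'cambridge',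
--         'tarrytown', 'north chicago', 'bridgewater', 'foster city',
--         'boston', 'somerville', 'waltham', 'san diego',
--         # Day-count patterns
--         'four days', '4 days', 'three days', '3 days', 'five days', '5 days',
--         'full-time onsite', 'fully onsite',
--     ]
--
--     inmail_lower = inmail_section.lower()
--     return any(term in inmail_lower for term in location_terms)
-- ===== SOURCE B (Python) =====
-- _LOCATION_TERMS = [
--     'onsite', 'on-site', 'on site',
--     'hybrid', 'days per week', 'days/week', 'd/w',
--     'days on-site', 'days on site', 'in-office', 'in office',
--     'based in', 'office-based', 'reporting to the',
--     'san francisco', 'south san francisco', 'newton', 'cambridge',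
--     'tarrytown', 'north chicago', 'bridgewater', 'foster city',
--     'boston', 'somerville', 'waltham', 'san diego',
--     'four days', '4 days', 'three days', '3 days', 'five days', '5 days',
--     'full-time onsite', 'fully onsite',
-- ]
--
-- def assert_onsite_disclosure(output: str, metadata: dict) -> bool:
--     if metadata.get('onsite_days', 0) < 3:
--         return True
--     pos = output.upper().find('INMAIL')
--     if pos == -1:
--         pos = output.lower().find('subject:')
--     if pos == -1:
--         return False
--     low = output[pos:].lower()
--     # one left-to-right scan: at each position test whether any term starts there
--     for i in range(len(low)):
--         tail = low[i:]
--         if any(tail.startswith(t) for t in _LOCATION_TERMS):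
--             return True
--     return False
-- ===== Notes on version B (the rewrite author's own statement) =====
-- stated objective: alternative
-- what changed: Replaces the per-term 'term in inmail_lower' repeated substring searches with a single left-to-right scan over the section that tests at each position whether any term starts there, and flattens the helper's find/fallback/empty-section branching into one position variable.
import Mathlib
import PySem

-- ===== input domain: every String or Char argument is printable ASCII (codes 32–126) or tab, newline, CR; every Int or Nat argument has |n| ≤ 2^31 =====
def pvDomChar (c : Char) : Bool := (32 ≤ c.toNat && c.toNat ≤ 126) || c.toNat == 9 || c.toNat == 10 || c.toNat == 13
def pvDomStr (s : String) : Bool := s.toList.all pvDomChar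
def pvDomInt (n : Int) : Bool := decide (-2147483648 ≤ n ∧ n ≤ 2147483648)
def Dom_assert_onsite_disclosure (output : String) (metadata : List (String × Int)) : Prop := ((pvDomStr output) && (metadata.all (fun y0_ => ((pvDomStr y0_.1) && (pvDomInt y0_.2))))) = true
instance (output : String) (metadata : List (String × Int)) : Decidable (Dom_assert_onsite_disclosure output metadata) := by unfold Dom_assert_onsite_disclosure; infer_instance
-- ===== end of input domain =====

-- B replaces the per-term substring searches with one left-to-right position scan (startswith at each index) and flattens the helper's branching; alternative structure, same values.


-- ===== PORT A =====
def pvLocationTermsA : List String := [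
  "onsite", "on-site", "on site",
  "hybrid", "days per week", "days/week", "d/w",
  "days on-site", "days on site", "in-office", "in office",
  "based in", "office-based", "reporting to the",
  "san francisco", "south san francisco", "newton", "cambridge",
  "tarrytown", "north chicago", "bridgewater", "foster city",
  "boston", "somerville", "waltham", "san diego",
  "four days", "4 days", "three days", "3 days", "five days", "5 days",
  "full-time onsite", "fully onsite"]

def pvGetInmailSection (output : String) : String :=
  let upper := PySem.Str.upper output
  let inmailPos := PySem.Str.find upper "INMAIL"
  if inmailPos = -1 then
    let subjPos := PySem.Str.find (PySem.Str.lower output) "subject:"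
    if subjPos ≠ -1 then PySem.Str.slice output (some subjPos) none
    else ""
  else PySem.Str.slice output (some inmailPos) none

def assert_onsite_disclosure (output : String) (metadata : List (String × Int)) : Bool :=
  let onsiteDays := ((metadata.lookup "onsite_days").getD (0 : Int))
  if onsiteDays < 3 then true
  else
    let inmailSection := pvGetInmailSection output
    if PySem.Str.len inmailSection = 0 then false
    else
      let inmailLower := PySem.Str.lower inmailSection
      pvLocationTermsA.any (fun t => PySem.Str.isIn t inmailLower)

-- ===== PORT B =====
def pvLocationTermsB : List String := [
  "onsite", "on-site", "on site",
  "hybrid", "days per week", "days/week", "d/w",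
  "days on-site", "days on site", "in-office", "in office",
  "based in", "office-based", "reporting to the",
  "san francisco", "south san francisco", "newton", "cambridge",
  "tarrytown", "north chicago", "bridgewater", "foster city",
  "boston", "somerville", "waltham", "san diego",
  "four days", "4 days", "three days", "3 days", "five days", "5 days",
  "full-time onsite", "fully onsite"]

def assert_onsite_disclosure_alt (output : String) (metadata : List (String × Int)) : Bool :=
  if ((metadata.lookup "onsite_days").getD (0 : Int)) < 3 then true
  else
    let pos0 := PySem.Str.find (PySem.Str.upper output) "INMAIL"
    let pos := if pos0 = -1 then PySem.Str.find (PySem.Str.lower output) "subject:" else pos0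
    if pos = -1 then false
    else
      let low := PySem.Str.lower (PySem.Str.slice output (some pos) none)
      (PySem.List.pyRange 0 (PySem.Str.len low : Int) 1).any (fun i =>
        let tail := PySem.Str.slice low (some i) none
        pvLocationTermsB.any (fun t => PySem.Str.startswith tail t))

-- ===== PRECONDITION & SPEC =====
def Spec_assert_onsite_disclosure (output : String) (metadata : List (String × Int)) (out : Bool) : Prop := out = assert_onsite_disclosure_alt output metadata
instance (output : String) (metadata : List (String × Int)) (out : Bool) : Decidable (Spec_assert_onsite_disclosure output metadata out) := by unfold Spec_assert_onsite_disclosure; infer_instance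

-- ===== CLAIM (what is proved, stated in full; the proofs are below) =====
def Claim_equal_assert_onsite_disclosure : Prop := ∀ (output : String) (metadata : List (String × Int)), Dom_assert_onsite_disclosure output metadata → Spec_assert_onsite_disclosure output metadata (assert_onsite_disclosure output metadata)

-- ===== LEMMAS AND PROOFS =====

lemma pvTerms_eq : pvLocationTermsA = pvLocationTermsB := rfl

lemma pvTerms_ne_nil : ∀ t ∈ pvLocationTermsB, t.toList ≠ [] := by decide

-- B's position scan over a string computes "some term is a substring of low".
lemma pvScan_eq (low : String) :
    (PySem.List.pyRange 0 (PySem.Str.len low : Int) 1).any (fun i =>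
        let tail := PySem.Str.slice low (some i) none
        pvLocationTermsB.any (fun t => PySem.Str.startswith tail t))
      = pvLocationTermsB.any (fun t => PySem.Str.isIn t low) := by
  rw [Bool.eq_iff_iff]
  simp only [List.any_eq_true]
  constructor
  · rintro ⟨i, hmem, t, ht, hsw⟩
    obtain ⟨h0, _⟩ := (PySem.List.mem_pyRange_one).mp hmem
    refine ⟨t, ht, ?_⟩
    rw [PySem.Str.isIn_eq, ← PySem.Chars.exists_prefix_drop_iff_isIn]
    refine ⟨i.toNat, ?_⟩
    rw [PySem.Str.startswith_eq, PySem.Chars.startswith_iff] at hsw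
    simpa [PySem.Str.toList_slice, PySem.Chars.slice_eq_listSlice,
      PySem.List.slice_from _ h0] using hsw
  · rintro ⟨t, ht, hin⟩
    rw [PySem.Str.isIn_eq, ← PySem.Chars.exists_prefix_drop_iff_isIn] at hin
    obtain ⟨j, hpre⟩ := hin
    have hj : j < low.toList.length := by
      by_contra h
      push Not at h
      rw [List.drop_eq_nil_of_le h] at hpre
      exact pvTerms_ne_nil t ht (List.prefix_nil.mp hpre)
    refine ⟨(j : Int), PySem.List.mem_pyRange_one.mpr ⟨by positivity, ?_⟩, t, ht, ?_⟩
    · simp [PySem.Str.len_eq]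
      exact_mod_cast hj
    · rw [PySem.Str.startswith_eq, PySem.Chars.startswith_iff]
      simpa [PySem.Str.toList_slice, PySem.Chars.slice_eq_listSlice,
        PySem.List.slice_from _ (by positivity : (0:Int) ≤ (j:Int))] using hpre

-- On an empty section no term is a substring of its lowering.
lemma pvAny_empty (sec : String) (hlen : PySem.Str.len sec = 0) :
    pvLocationTermsB.any (fun t => PySem.Str.isIn t (PySem.Str.lower sec)) = false := by
  have h : sec.toList = [] := by
    rw [PySem.Str.len_eq] at hlen
    exact List.length_eq_zero_iff.mp (by exact_mod_cast hlen)
  have hnil : (PySem.Str.lower sec).toList = [] := by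
    simp [PySem.Str.toList_lower, h, PySem.Chars.lower]
  rw [List.any_eq_false]
  intro t ht
  simp only [PySem.Str.isIn_eq, hnil, PySem.Chars.isIn_iff_infix]
  intro hinf
  exact pvTerms_ne_nil t ht (List.infix_nil.mp hinf ▸ rfl)

-- A's empty-section guard plus its any-isIn test equals B's position scan, for any section string.
lemma pvBranch (sec : String) :
    (if PySem.Str.len sec = 0 then false
     else pvLocationTermsA.any (fun t => PySem.Str.isIn t (PySem.Str.lower sec)))
    = (PySem.List.pyRange 0 (PySem.Str.len (PySem.Str.lower sec) : Int) 1).any (fun i =>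
        let tail := PySem.Str.slice (PySem.Str.lower sec) (some i) none
        pvLocationTermsB.any (fun t => PySem.Str.startswith tail t)) := by
  rw [pvScan_eq, pvTerms_eq]
  by_cases hlen : PySem.Str.len sec = 0
  · rw [if_pos hlen, pvAny_empty sec hlen]
  · rw [if_neg hlen]

lemma pvLen_empty : PySem.Str.len "" = 0 := by decide

-- ===== VERDICT (by name: the statement is the Claim_ definition above) =====
theorem assert_onsite_disclosure_spec : Claim_equal_assert_onsite_disclosure := by
  intro output metadata _
  unfold Spec_assert_onsite_disclosure assert_onsite_disclosure assert_onsite_disclosure_alt pvGetInmailSection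
  by_cases hd : ((metadata.lookup "onsite_days").getD (0 : Int)) < 3
  · simp only [if_pos hd]
  · simp only [if_neg hd]
    by_cases h0 : PySem.Str.find (PySem.Str.upper output) "INMAIL" = -1
    · by_cases h1 : PySem.Str.find (PySem.Str.lower output) "subject:" = -1
      · simp only [h0, h1, ne_eq, not_true_eq_false, ite_true, ite_false,
          pvLen_empty]
      · simp only [h0, h1, ne_eq, not_false_eq_true, ite_true, ite_false]
        exact pvBranch (PySem.Str.slice output (some (PySem.Str.find (PySem.Str.lower output) "subject:")) none)
    · simp only [h0, ne_eq, ite_false]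
      exact pvBranch (PySem.Str.slice output (some (PySem.Str.find (PySem.Str.upper output) "INMAIL")) none)
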